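-- pv_equiv track=rewrite | github.com/GitMonsters/octotetrahedral-agi | core/primitives.py | p_mirror_v_complete
-- ===== SOURCE A (Python) =====
-- from typing import List, Dict, Tuple, Optional, Callable, Any, Set
-- from collections import Counter
--
-- Grid = List[List[int]]
--
-- def p_mirror_v_complete(grid: Grid) -> Grid:
--     """Mirror non-bg cells vertically to complete symmetry."""
--     bg = _bg(grid)
--     result = [row[:] for row in grid]
--     rows, cols = len(grid), len(grid[0])
--     for r in range(rows):
--         mr = rows - 1 - r
--         for c in range(cols):
--             if grid[r][c] != bg and result[mr][c] == bg:
--                 result[mr][c] = grid[r][c]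
--             elif grid[mr][c] != bg and result[r][c] == bg:
--                 result[r][c] = grid[mr][c]
--     return result
--
-- def _bg(grid: Grid) -> int:
--     counts = Counter(c for row in grid for c in row)
--     return counts.most_common(1)[0][0] if counts else 0
-- ===== SOURCE B (Python) =====
-- from typing import List
-- from collections import Counter
--
-- Grid = List[List[int]]
--
-- def _bg(grid: Grid) -> int:
--     counts = Counter(c for row in grid for c in row)
--     return counts.most_common(1)[0][0] if counts else 0
--
-- def p_mirror_v_complete(grid: Grid) -> Grid:
--     """Mirror non-bg cells vertically to complete symmetry (per-cell formula)."""
--     bg = _bg(grid)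
--     rows, cols = len(grid), len(grid[0])
--     return [[grid[r][c] if grid[r][c] != bg else grid[rows - 1 - r][c]
--              for c in range(cols)]
--             for r in range(rows)]
-- ===== Notes on version B (the rewrite author's own statement) =====
-- stated objective: simpler
-- what changed: A's stateful two-pass loop that mutates `result` and re-reads it is replaced by a direct order-independent per-cell comprehension (each cell is grid[r][c] if non-bg, else the vertically mirrored cell); Pre_ excludes non-rectangular grids, where A either raises IndexError (a row shorter than the first) or accidentally preserves cells beyond the first row's width via its copy-then-patch mutation, and the empty grid (IndexError on grid[0]).
-- outside the precondition, e.g. on p_mirror_v_complete([[1, 0], [0, 0, 5]]): A returns [[1, 0], [1, 0, 5]], B returns [[1, 0], [1, 0]]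
import Mathlib
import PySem

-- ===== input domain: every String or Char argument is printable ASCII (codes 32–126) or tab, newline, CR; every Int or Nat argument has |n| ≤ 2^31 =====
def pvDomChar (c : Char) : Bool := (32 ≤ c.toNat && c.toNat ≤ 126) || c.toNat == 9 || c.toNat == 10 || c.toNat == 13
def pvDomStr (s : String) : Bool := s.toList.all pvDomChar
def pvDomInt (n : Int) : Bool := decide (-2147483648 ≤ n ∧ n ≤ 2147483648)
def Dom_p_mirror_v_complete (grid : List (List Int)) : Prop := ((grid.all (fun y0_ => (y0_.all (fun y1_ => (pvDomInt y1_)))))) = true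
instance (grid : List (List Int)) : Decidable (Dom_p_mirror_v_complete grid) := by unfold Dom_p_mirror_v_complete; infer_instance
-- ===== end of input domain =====

-- B replaces A's order-dependent two-pass mutate-and-reread loop with a direct
-- per-cell formula (keep a non-bg cell, otherwise take the vertically mirrored
-- cell); a different decomposition of the same task, same asymptotic cost.
-- A mutates only its local copy `result`, never the argument.

-- ===== PORT A =====
-- shared helper: port of _bg (Counter over all cells, then most_common(1); ties go to the
-- first key of maximal count in insertion order, exactly Python's nlargest(1) tie-breaking);
-- 0 when the grid has no cells.
def pvBg (grid : List (List Int)) : Int :=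
  let counts := PySem.Dict.counter (grid.flatMap (fun row => row))
  match counts.items with
  | [] => 0
  | kv :: rest => (rest.foldl (fun best p => if p.2 > best.2 then p else best) kv).1

-- one body of A's inner loop (r, c fixed); all indices r, c, rows-1-r are Nats in
-- [0, rows) / [0, cols) under Pre_, so List.getD / List.set are exact ports of
-- Python's indexing and item assignment there (mr = rows - 1 - r is inlined).
def pvAstep (grid : List (List Int)) (bg : Int) (rows r : Nat)
    (res : List (List Int)) (c : Nat) : List (List Int) :=
  -- mr = rows - 1 - r
  if (grid.getD r []).getD c 0 ≠ bg ∧ (res.getD (rows - 1 - r) []).getD c 0 = bg then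
    res.set (rows - 1 - r) ((res.getD (rows - 1 - r) []).set c ((grid.getD r []).getD c 0))
  else if (grid.getD (rows - 1 - r) []).getD c 0 ≠ bg ∧ (res.getD r []).getD c 0 = bg then
    res.set r ((res.getD r []).set c ((grid.getD (rows - 1 - r) []).getD c 0))
  else res

def p_mirror_v_complete (grid : List (List Int)) : List (List Int) :=
  let bg := pvBg grid
  let rows := grid.length
  let cols := (grid.getD 0 []).length   -- len(grid[0]); grid ≠ [] under Pre_
  (List.range rows).foldl
    (fun res r => (List.range cols).foldl (pvAstep grid bg rows r) res)
    grid   -- result = [row[:] for row in grid] is, as a value, grid itself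

-- ===== PORT B =====
def p_mirror_v_complete_alt (grid : List (List Int)) : List (List Int) :=
  let bg := pvBg grid
  let rows := grid.length
  let cols := (grid.getD 0 []).length
  (List.range rows).map (fun r =>
    (List.range cols).map (fun c =>
      if (grid.getD r []).getD c 0 ≠ bg then (grid.getD r []).getD c 0
      else (grid.getD (rows - 1 - r) []).getD c 0))

-- ===== PRECONDITION & SPEC =====
-- Pre_ excludes the empty grid (A raises IndexError on grid[0]) and non-rectangular grids:
-- there A raises IndexError when a row is shorter than the first, and when a row is longer
-- A's preservation of the cells beyond the first row's width is an accident of its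
-- copy-then-patch mutation; B's natural comprehension produces a rectangular result.
def Pre_p_mirror_v_complete (grid : List (List Int)) : Prop :=
  grid ≠ [] ∧ ∀ row ∈ grid, row.length = (grid.getD 0 []).length
instance (grid : List (List Int)) : Decidable (Pre_p_mirror_v_complete grid) := by
  unfold Pre_p_mirror_v_complete; infer_instance

def pvWitness_p_mirror_v_complete : List (List Int) := [[1, 0], [0, 0]]

def Spec_p_mirror_v_complete (grid : List (List Int)) (out : List (List Int)) : Prop := out = p_mirror_v_complete_alt grid
instance (grid : List (List Int)) (out : List (List Int)) : Decidable (Spec_p_mirror_v_complete grid out) := by unfold Spec_p_mirror_v_complete; infer_instance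

-- ===== CLAIM (what is proved, stated in full; the proofs are below) =====
def Claim_equal_p_mirror_v_complete : Prop := ∀ (grid : List (List Int)), Dom_p_mirror_v_complete grid → Pre_p_mirror_v_complete grid → Spec_p_mirror_v_complete grid (p_mirror_v_complete grid)

-- ===== LEMMAS AND PROOFS =====
-- pvCell is B's per-cell value; pvMix grid bg rows r n is row r with its first n cells
-- rewritten to B's values and the rest still original. The proof shows: A's inner loop,
-- run at r on a state whose rows r and rows-1-r are untouched, rewrites exactly those two
-- rows to B's values (pv_inner_fresh); run again on already-rewritten rows it is the
-- identity (pv_inner_done); the outer loop therefore rewrites every row (pv_outer).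

def pvCell (grid : List (List Int)) (bg : Int) (rows r c : Nat) : Int :=
  if (grid.getD r []).getD c 0 ≠ bg then (grid.getD r []).getD c 0
  else (grid.getD (rows - 1 - r) []).getD c 0
def pvMix (grid : List (List Int)) (bg : Int) (rows r n : Nat) : List Int :=
  (List.range n).map (pvCell grid bg rows r) ++ (grid.getD r []).drop n

lemma pv_getD_map_range {α : Type} (f : Nat → α) (n i : Nat) (d : α) (h : i < n) :
    ((List.range n).map f).getD i d = f i := by
  rw [List.getD_eq_getElem _ _ (by simpa using h)]; simp

lemma pvMix_succ (grid : List (List Int)) (bg : Int) (rows r n : Nat)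
    (h : n < (grid.getD r []).length) :
    pvMix grid bg rows r (n + 1)
      = (pvMix grid bg rows r n).set n (pvCell grid bg rows r n) := by
  unfold pvMix
  rw [List.range_succ, List.map_append, List.set_append, if_neg (by simp),
      List.drop_eq_getElem_cons h]
  simp only [List.map_cons, List.map_nil, List.length_map, List.length_range, Nat.sub_self,
    List.set_cons_zero, List.append_assoc, List.cons_append, List.nil_append]

lemma pvMix_read (grid : List (List Int)) (bg : Int) (rows r n : Nat)
    (_h : n < (grid.getD r []).length) :
    (pvMix grid bg rows r n).getD n 0 = (grid.getD r []).getD n 0 := by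
  unfold pvMix
  simp only [List.getD]
  rw [List.getElem?_append_right (by simp)]
  simp [List.getElem?_drop]

lemma pvMix_read_lt (grid : List (List Int)) (bg : Int) (rows r n c : Nat)
    (h : c < n) :
    (pvMix grid bg rows r n).getD c 0 = pvCell grid bg rows r c := by
  unfold pvMix
  rw [List.getD_append _ _ _ _ (by simp [h])]
  exact pv_getD_map_range _ _ _ _ h


lemma pvMix_zero (grid : List (List Int)) (bg : Int) (rows r : Nat) :
    pvMix grid bg rows r 0 = grid.getD r [] := by simp [pvMix]

lemma pvMix_stable (grid : List (List Int)) (bg : Int) (rows r n : Nat)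
    (h : n < (grid.getD r []).length)
    (hc : pvCell grid bg rows r n = (grid.getD r []).getD n 0) :
    pvMix grid bg rows r (n + 1) = pvMix grid bg rows r n := by
  rw [pvMix_succ grid bg rows r n h, hc]
  have hlen : n < (pvMix grid bg rows r n).length := by
    simp only [pvMix, List.length_append, List.length_map, List.length_range, List.length_drop]
    omega
  have hrd : (pvMix grid bg rows r n).getD n 0 = (grid.getD r []).getD n 0 :=
    pvMix_read grid bg rows r n h
  rw [← hrd, List.getD_eq_getElem _ _ hlen, List.set_getElem_self]

lemma pv_map_range_congr {α : Type} (f g : Nat → α) (n : Nat)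
    (h : ∀ j, j < n → f j = g j) :
    (List.range n).map f = (List.range n).map g := by
  apply List.map_congr_left
  intro j hj
  exact h j (List.mem_range.mp hj)

lemma pv_map_range_set {α : Type} (f : Nat → α) (n i : Nat) (v : α) (_h : i < n) :
    ((List.range n).map f).set i v
      = (List.range n).map (fun j => if j = i then v else f j) := by
  apply List.ext_getElem
  · simp
  · intro j h1 h2
    simp only [List.getElem_set, List.getElem_map, List.getElem_range]
    by_cases hij : i = j
    · simp [hij]
    · rw [if_neg hij, if_neg (fun hh => hij hh.symm)]

lemma pv_row_len (grid : List (List Int)) (cols i : Nat)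
    (hlen : ∀ row ∈ grid, cols ≤ row.length) (hi : i < grid.length) :
    cols ≤ (grid.getD i []).length := by
  rw [List.getD_eq_getElem _ _ hi]
  exact hlen _ (List.getElem_mem hi)

lemma pv_inner_fresh (grid : List (List Int)) (bg : Int) (rows cols : Nat)
    (hrows : rows = grid.length)
    (hlen : ∀ row ∈ grid, cols ≤ row.length)
    (r : Nat) (hr : r < rows) (hrm : r ≤ rows - 1 - r)
    (g : Nat → List Int)
    (hgr : g r = grid.getD r []) (hgm : g (rows - 1 - r) = grid.getD (rows - 1 - r) [])
    (n : Nat) (hn : n ≤ cols) :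
    (List.range n).foldl (pvAstep grid bg rows r) ((List.range rows).map g)
      = (List.range rows).map (fun j =>
          if j = r then pvMix grid bg rows r n
          else if j = rows - 1 - r then pvMix grid bg rows (rows - 1 - r) n
          else g j) := by
  have hmr : rows - 1 - r < rows := by omega
  have hmrr : rows - 1 - (rows - 1 - r) = r := by omega
  induction n with
  | zero =>
    simp only [List.range_zero, List.foldl_nil]
    apply pv_map_range_congr
    intro j hj
    by_cases h1 : j = r
    · subst h1; rw [if_pos rfl, pvMix_zero, hgr]
    · rw [if_neg h1]
      by_cases h2 : j = rows - 1 - r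
      · subst h2; rw [if_pos rfl, pvMix_zero, hgm]
      · rw [if_neg h2]
  | succ n ih =>
    have hn' : n ≤ cols := by omega
    have lenr : n < (grid.getD r []).length := by
      have := pv_row_len grid cols r hlen (by omega); omega
    have lenm : n < (grid.getD (rows - 1 - r) []).length := by
      have := pv_row_len grid cols (rows - 1 - r) hlen (by omega); omega
    rw [List.range_succ, List.foldl_append, ih hn', List.foldl_cons, List.foldl_nil]
    set fn := fun j =>
          if j = r then pvMix grid bg rows r n
          else if j = rows - 1 - r then pvMix grid bg rows (rows - 1 - r) n
          else g j with hfn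
    have hfnr : fn r = pvMix grid bg rows r n := by simp [hfn]
    have hfnm : fn (rows - 1 - r) = pvMix grid bg rows (rows - 1 - r) n := by
      by_cases h : rows - 1 - r = r
      · simp [hfn, h]
      · simp [hfn, h]
    unfold pvAstep
    rw [pv_getD_map_range _ _ _ _ (by omega), pv_getD_map_range _ _ _ _ (by omega),
        hfnr, hfnm, pvMix_read _ _ _ _ _ lenr, pvMix_read _ _ _ _ _ lenm]
    split_ifs with hc1 hc2
    · -- writes the mirrored row
      have hne : r ≠ rows - 1 - r := fun e => hc1.1 (by rw [e]; exact hc1.2)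
      have hne' : rows - 1 - r ≠ r := fun e => hne e.symm
      rw [pv_map_range_set _ _ _ _ hmr]
      apply pv_map_range_congr
      intro j hj
      rcases eq_or_ne j (rows - 1 - r) with h1 | h1
      · have hcell : pvCell grid bg rows (rows - 1 - r) n = (grid.getD r []).getD n 0 := by
          unfold pvCell; rw [if_neg (by simpa using hc1.2), hmrr]
        have hs := pvMix_succ grid bg rows (rows - 1 - r) n lenm
        simp [h1, hne', hs, hcell]
      · rcases eq_or_ne j r with h2 | h2
        · have hs : pvMix grid bg rows r (n + 1) = pvMix grid bg rows r n :=
            pvMix_stable _ _ _ _ _ lenr (by unfold pvCell; rw [if_pos hc1.1])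
          simp [hfn, h2, hs, hne]
        · simp [hfn, h1, h2]
    · -- writes row r
      have hne : r ≠ rows - 1 - r := fun e => hc2.1 (by rw [← e]; exact hc2.2)
      have hne' : rows - 1 - r ≠ r := fun e => hne e.symm
      rw [pv_map_range_set _ _ _ _ hr]
      apply pv_map_range_congr
      intro j hj
      rcases eq_or_ne j r with h2 | h2
      · have hcell : pvCell grid bg rows r n = (grid.getD (rows - 1 - r) []).getD n 0 := by
          unfold pvCell; rw [if_neg (by simpa using hc2.2)]
        have hs := pvMix_succ grid bg rows r n lenr
        simp [h2, hs, hcell]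
      · rcases eq_or_ne j (rows - 1 - r) with h1 | h1
        · have hs : pvMix grid bg rows (rows - 1 - r) (n + 1) = pvMix grid bg rows (rows - 1 - r) n :=
            pvMix_stable _ _ _ _ _ lenm (by unfold pvCell; rw [if_pos hc2.1])
          simp [hfn, h1, hs, hne']
        · simp [hfn, h1, h2]
    · -- no write
      apply pv_map_range_congr
      intro j hj
      rcases eq_or_ne j r with h2 | h2
      · have hs : pvMix grid bg rows r (n + 1) = pvMix grid bg rows r n :=
          pvMix_stable _ _ _ _ _ lenr (by
            unfold pvCell
            by_cases hb : (grid.getD r []).getD n 0 = bg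
            · rw [if_neg (by simpa using hb), hb]
              by_cases hm : (grid.getD (rows - 1 - r) []).getD n 0 = bg
              · exact hm
              · exact absurd ⟨hm, hb⟩ hc2
            · rw [if_pos hb])
        simp [hfn, h2, hs]
      · rcases eq_or_ne j (rows - 1 - r) with h1 | h1
        · have hs : pvMix grid bg rows (rows - 1 - r) (n + 1) = pvMix grid bg rows (rows - 1 - r) n :=
            pvMix_stable _ _ _ _ _ lenm (by
              unfold pvCell
              by_cases hm : (grid.getD (rows - 1 - r) []).getD n 0 = bg
              · rw [if_neg (by simpa using hm), hmrr, hm]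
                by_cases hb : (grid.getD r []).getD n 0 = bg
                · exact hb
                · exact absurd ⟨hb, hm⟩ hc1
              · rw [if_pos hm])
          have hx : rows - 1 - r ≠ r := by rw [← h1]; exact h2
          simp [hfn, h1, hs, hx]
        · simp [hfn, h1, h2]

lemma pv_self_map (l : List (List Int)) :
    (List.range l.length).map (fun i => l.getD i []) = l := by
  apply List.ext_getElem
  · simp
  · intro j h1 h2
    simp only [List.getElem_map, List.getElem_range]
    rw [List.getD_eq_getElem _ _ h2]

lemma pv_inner_done (grid : List (List Int)) (bg : Int) (rows cols : Nat)
    (hrows : rows = grid.length)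
    (_hlen : ∀ row ∈ grid, cols ≤ row.length)
    (r : Nat) (hr : r < rows) (hrm : rows - 1 - r < r)
    (g : Nat → List Int)
    (hgr : g r = pvMix grid bg rows r cols)
    (hgm : g (rows - 1 - r) = pvMix grid bg rows (rows - 1 - r) cols)
    (n : Nat) (hn : n ≤ cols) :
    (List.range n).foldl (pvAstep grid bg rows r) ((List.range rows).map g)
      = (List.range rows).map g := by
  have hmr : rows - 1 - r < rows := by omega
  have hmrr : rows - 1 - (rows - 1 - r) = r := by omega
  induction n with
  | zero => simp
  | succ n ih =>
    rw [List.range_succ, List.foldl_append, ih (by omega), List.foldl_cons, List.foldl_nil]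
    unfold pvAstep
    rw [pv_getD_map_range _ _ _ _ (by omega), pv_getD_map_range _ _ _ _ (by omega),
        hgr, hgm, pvMix_read_lt _ _ _ _ _ _ (by omega), pvMix_read_lt _ _ _ _ _ _ (by omega)]
    have hfalse1 : ¬((grid.getD r []).getD n 0 ≠ bg ∧ pvCell grid bg rows (rows - 1 - r) n = bg) := by
      rintro ⟨ha, hb⟩
      unfold pvCell at hb
      rw [hmrr] at hb
      by_cases hm : (grid.getD (rows - 1 - r) []).getD n 0 = bg
      · rw [if_neg (by simpa using hm)] at hb; exact ha hb
      · rw [if_pos hm] at hb; exact hm hb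
    have hfalse2 : ¬((grid.getD (rows - 1 - r) []).getD n 0 ≠ bg ∧ pvCell grid bg rows r n = bg) := by
      rintro ⟨ha, hb⟩
      unfold pvCell at hb
      by_cases hm : (grid.getD r []).getD n 0 = bg
      · rw [if_neg (by simpa using hm)] at hb; exact ha hb
      · rw [if_pos hm] at hb; exact hm hb
    rw [if_neg hfalse1, if_neg hfalse2]

lemma pv_outer (grid : List (List Int)) (bg : Int) (rows cols : Nat)
    (hrows : rows = grid.length)
    (hlen : ∀ row ∈ grid, cols ≤ row.length)
    (k : Nat) (hk : k ≤ rows) :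
    (List.range k).foldl
        (fun res r => (List.range cols).foldl (pvAstep grid bg rows r) res) grid
      = (List.range rows).map (fun i =>
          if min i (rows - 1 - i) < k then pvMix grid bg rows i cols
          else grid.getD i []) := by
  induction k with
  | zero =>
    simp only [List.range_zero, List.foldl_nil, Nat.not_lt_zero, if_false]
    rw [hrows, pv_self_map]
  | succ k ih =>
    rw [List.range_succ, List.foldl_append, ih (by omega), List.foldl_cons, List.foldl_nil]
    by_cases hfresh : k ≤ rows - 1 - k
    · rw [pv_inner_fresh grid bg rows cols hrows hlen k (by omega) hfresh _
          (by rw [if_neg (by omega)]) (by rw [if_neg (by omega)]) cols le_rfl]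
      apply pv_map_range_congr
      intro j hj
      rcases eq_or_ne j k with h1 | h1
      · subst h1; rw [if_pos rfl, if_pos (by omega)]
      · rcases eq_or_ne j (rows - 1 - k) with h2 | h2
        · subst h2; rw [if_neg h1, if_pos rfl, if_pos (by omega)]
        · rw [if_neg h1, if_neg h2]
          have hne : min j (rows - 1 - j) ≠ k := by omega
          by_cases hlt : min j (rows - 1 - j) < k
          · rw [if_pos hlt, if_pos (by omega)]
          · rw [if_neg hlt, if_neg (by omega)]
    · rw [pv_inner_done grid bg rows cols hrows hlen k (by omega) (by omega) _
          (by rw [if_pos (by omega)]) (by rw [if_pos (by omega)]) cols le_rfl]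
      apply pv_map_range_congr
      intro j hj
      have hne : min j (rows - 1 - j) ≠ k := by omega
      by_cases hlt : min j (rows - 1 - j) < k
      · rw [if_pos hlt, if_pos (by omega)]
      · rw [if_neg hlt, if_neg (by omega)]

-- ===== VERDICT (by name: the statement is the Claim_ definition above) =====
theorem p_mirror_v_complete_spec : Claim_equal_p_mirror_v_complete := by
  intro grid _ hpre
  obtain ⟨hne, hlen⟩ := hpre
  have hlen' : ∀ row ∈ grid, (grid.getD 0 []).length ≤ row.length :=
    fun row h => (hlen row h).ge
  show (List.range grid.length).foldl
      (fun res r => (List.range (grid.getD 0 []).length).foldl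
        (pvAstep grid (pvBg grid) grid.length r) res) grid
    = p_mirror_v_complete_alt grid
  rw [pv_outer grid (pvBg grid) grid.length (grid.getD 0 []).length rfl hlen' grid.length le_rfl]
  apply pv_map_range_congr
  intro i hi
  rw [if_pos (by omega)]
  unfold pvMix
  have hdrop : (grid.getD i []).drop (grid.getD 0 []).length = [] := by
    apply List.drop_eq_nil_of_le
    rw [List.getD_eq_getElem _ _ hi]
    exact (hlen _ (List.getElem_mem hi)).le
  rw [hdrop, List.append_nil]
  rfl
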